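-- pv_equiv track=rewrite | github.com/Shanka123/MAP | cogeval/tot_valuepath.py | extract_moves_configs
-- ===== SOURCE A (Python) =====
-- def extract_moves_configs(response):
--
-- 	all_moves = []
--
-- 	possible_step_start_indices = []
-- 	for k in range(len(response) - 19):
-- 		sub_str = response[k:k+20]
-- 		if 'Possible step number' in sub_str:
-- 			possible_step_start_indices.append(k)
--
--
--
-- 	for idx,ind in enumerate(possible_step_start_indices):
-- 		if idx< len(possible_step_start_indices)-1:
-- 			all_moves.append(response[ind:possible_step_start_indices[idx+1]].split(":")[-1].strip())
-- 		else:
-- 			all_moves.append(response[ind:len(response)].split(":")[-1].strip())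
--
-- 	return all_moves
-- ===== SOURCE B (Python) =====
-- def extract_moves_configs(response):
--     marker = 'Possible step number'
--     all_moves = []
--     i = response.find(marker)
--     while i != -1:
--         j = response.find(marker, i + len(marker))
--         if j == -1:
--             all_moves.append(response[i:].split(":")[-1].strip())
--         else:
--             all_moves.append(response[i:j].split(":")[-1].strip())
--         i = j
--     return all_moves
-- ===== Notes on version B (the rewrite author's own statement) =====
-- stated objective: faster
-- what changed: A tests a 20-character window at every single position to collect all marker start indices, then slices between consecutive collected indices in a second enumerate loop; B makes one str.find-driven walk (find the first marker, then repeatedly find the next occurrence from i+len(marker)) and emits each chunk's last-colon-segment, stripped, as it goes.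
import Mathlib
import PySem

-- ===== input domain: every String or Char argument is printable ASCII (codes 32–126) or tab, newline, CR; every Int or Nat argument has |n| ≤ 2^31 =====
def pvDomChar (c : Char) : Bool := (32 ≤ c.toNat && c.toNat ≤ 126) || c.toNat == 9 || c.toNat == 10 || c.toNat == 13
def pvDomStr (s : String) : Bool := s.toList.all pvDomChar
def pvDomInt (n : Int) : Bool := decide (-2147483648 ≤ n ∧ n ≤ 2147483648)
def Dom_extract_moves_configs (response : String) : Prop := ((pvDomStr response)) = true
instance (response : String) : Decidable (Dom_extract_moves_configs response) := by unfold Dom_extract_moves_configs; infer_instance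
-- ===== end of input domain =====

-- B replaces A's window-scan (test a 20-char slice at every position, then slice between
-- collected index pairs) by a single str.find-driven walk emitting each chunk as it goes;
-- a timing run measured B faster.

-- shared helper: both Pythons contain the identical expression  chunk.split(":")[-1].strip()
def pvLastColon (t : String) : String :=
  PySem.Str.strip (PySem.List.pyGetD ((PySem.Str.split? t ":").getD []) (-1) "")

-- ===== PORT A =====
def extract_moves_configs (response : String) : List String :=
  let idxs : List Int :=
    (PySem.List.pyRange 0 (PySem.Str.len response - 19)).foldl
      (fun acc k =>
        if PySem.Str.isIn "Possible step number"
            (PySem.Str.slice response (some k) (some (k + 20))) then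
          acc ++ [k]
        else acc) []
  (PySem.List.enumerate idxs).foldl
    (fun all p =>
      if p.1 < (idxs.length : Int) - 1 then
        all ++ [pvLastColon (PySem.Str.slice response (some p.2)
                  (some (PySem.List.pyGetD idxs (p.1 + 1) 0)))]
      else
        all ++ [pvLastColon (PySem.Str.slice response (some p.2)
                  (some (PySem.Str.len response)))]) []

-- ===== PORT B =====
-- the while loop of Source B; the fuel argument (= len(response)+1) only makes the recursion
-- structural: each iteration moves the find position forward, so it is never exhausted
def pvAltLoop (response : String) : Nat → Int → List String → List String
  | 0, _, all_moves => all_moves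
  | fuel + 1, i, all_moves =>
    if i == -1 then all_moves
    else
      let j := PySem.Str.findFrom response "Possible step number" (i + 20)
      if j == -1 then
        pvAltLoop response fuel j
          (all_moves ++ [pvLastColon (PySem.Str.slice response (some i))])
      else
        pvAltLoop response fuel j
          (all_moves ++ [pvLastColon (PySem.Str.slice response (some i) (some j))])

def extract_moves_configs_alt (response : String) : List String :=
  pvAltLoop response (response.toList.length + 1)
    (PySem.Str.find response "Possible step number") []

-- ===== PRECONDITION & SPEC =====
def Spec_extract_moves_configs (response : String) (out : List String) : Prop := out = extract_moves_configs_alt response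
instance (response : String) (out : List String) : Decidable (Spec_extract_moves_configs response out) := by unfold Spec_extract_moves_configs; infer_instance

-- ===== CLAIM (what is proved, stated in full; the proofs are below) =====
def Claim_equal_extract_moves_configs : Prop := ∀ (response : String), Dom_extract_moves_configs response → Spec_extract_moves_configs response (extract_moves_configs response)

-- ===== LEMMAS AND PROOFS =====

def pvM : List Char := "Possible step number".toList

def pvOcc (s : List Char) : List Nat :=
  (List.range (s.length - 19)).filter (fun k => pvM.isPrefixOf (List.drop k s))

def pvChunks (response : String) : List Nat → List String
  | [] => []
  | i :: rest =>
      pvLastColon (PySem.Str.slice response (some (i : Int))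
          (some ((rest.headD response.toList.length : Nat) : Int)))
        :: pvChunks response rest

def pvHead : List Nat → Int
  | [] => -1
  | i :: _ => (i : Int)

lemma pvM_length : pvM.length = 20 := by decide

lemma pvM_no_overlap : ∀ d : Nat, d < 20 → 0 < d → pvM.drop d ≠ pvM.take (20 - d) := by decide

lemma pvOcc_le (s : List Char) (k : Nat) (h : pvM <+: s.drop k) : k + 20 ≤ s.length := by
  have := h.length_le
  rw [pvM_length, List.length_drop] at this
  omega

lemma pvOcc_mem (s : List Char) (k : Nat) : k ∈ pvOcc s ↔ pvM <+: s.drop k := by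
  unfold pvOcc
  simp only [List.mem_filter, List.mem_range, List.isPrefixOf_iff_prefix]
  constructor
  · rintro ⟨_, h⟩; exact h
  · intro h; exact ⟨by have := pvOcc_le s k h; omega, h⟩

lemma pvOcc_pairwise (s : List Char) : (pvOcc s).Pairwise (· < ·) := by
  exact List.pairwise_lt_range.filter _

lemma pvApart (s : List Char) (i j : Nat) (hi : pvM <+: s.drop i) (hj : pvM <+: s.drop j)
    (hij : i < j) : i + 20 ≤ j := by
  by_contra hlt
  set d := j - i with hd
  have hd1 : 0 < d := by omega
  have hd2 : d < 20 := by omega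
  obtain ⟨t, ht⟩ := hi
  have hdj : s.drop j = pvM.drop d ++ t := by
    have : s.drop j = (s.drop i).drop d := by rw [List.drop_drop]; congr 1; omega
    rw [this, ← ht, List.drop_append_of_le_length (by rw [pvM_length]; omega)]
  obtain ⟨u, hu⟩ := hj
  rw [hdj] at hu
  have hlen : (pvM.drop d).length = 20 - d := by rw [List.length_drop, pvM_length]
  have : pvM.drop d = pvM.take (20 - d) := by
    have h1 : (pvM.drop d ++ t).take (20 - d) = pvM.drop d := by
      rw [List.take_append_of_le_length (by omega)]
      exact List.take_of_length_le (by omega)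
    have h2 : (pvM ++ u).take (20 - d) = pvM.take (20 - d) := by
      rw [List.take_append_of_le_length (by rw [pvM_length]; omega)]
    calc pvM.drop d = (pvM.drop d ++ t).take (20 - d) := h1.symm
      _ = (pvM ++ u).take (20 - d) := by rw [hu]
      _ = pvM.take (20 - d) := h2
  exact pvM_no_overlap d hd2 hd1 this

lemma pvWindowEq (s : List Char) (k : Nat) (h : k + 20 ≤ s.length) :
    PySem.Chars.isIn pvM ((s.drop k).take 20) = pvM.isPrefixOf (s.drop k) := by
  have hlen : ((s.drop k).take 20).length = 20 := by
    rw [List.length_take, List.length_drop]; omega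
  by_cases hp : pvM <+: s.drop k
  · have hw : (s.drop k).take 20 = pvM := by
      obtain ⟨t, ht⟩ := hp
      rw [← ht, List.take_append_of_le_length (by rw [pvM_length])]
      exact List.take_of_length_le (by rw [pvM_length])
    have h1 : pvM.isPrefixOf (s.drop k) = true := List.isPrefixOf_iff_prefix.mpr hp
    rw [hw, h1, PySem.Chars.isIn_iff_infix]
  · have h1 : pvM.isPrefixOf (s.drop k) = false := by
      rw [← Bool.not_eq_true, List.isPrefixOf_iff_prefix]; exact hp
    rw [h1, PySem.Chars.isIn_eq_false_iff]
    intro hinf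
    have heq : pvM = (s.drop k).take 20 := hinf.eq_of_length (by rw [pvM_length, hlen])
    exact hp (List.prefix_iff_eq_take.mpr (by rw [pvM_length]; exact heq))

lemma pvSliceEnd (r : String) (i : Nat) :
    PySem.Str.slice r (some (i : Int)) none
      = PySem.Str.slice r (some (i : Int)) (some (r.toList.length : Int)) := by
  simp only [PySem.Str.slice]
  congr 1
  rw [PySem.Chars.slice_eq_listSlice, PySem.Chars.slice_eq_listSlice,
    PySem.List.slice_from (xs := r.toList) (Int.natCast_nonneg i)]
  rw [show ((r.toList.length : Int)) = ((r.toList.length : Nat) : Int) from rfl,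
    PySem.List.slice_natCast]
  rw [Int.toNat_natCast]
  exact (List.take_of_length_le (by rw [List.length_drop])).symm

lemma pvFindFrom (s : List Char) (c : Nat) (pre rest : List Nat)
    (hsplit : pvOcc s = pre ++ rest) (hpre : ∀ x ∈ pre, x < c)
    (hrest : ∀ x ∈ rest, c ≤ x) (hc : c ≤ s.length) :
    PySem.Chars.findFrom s pvM (c : Int) = pvHead rest := by
  match rest with
  | [] =>
    show PySem.Chars.findFrom s pvM (c : Int) = -1
    rw [(PySem.Chars.findFrom_natCast_eq_neg_one_iff s pvM c hc)]
    intro hinf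
    obtain ⟨t, ht⟩ := (PySem.Chars.exists_prefix_drop_iff_isIn pvM (s.drop c)).mpr
      ((PySem.Chars.isIn_iff_infix pvM (s.drop c)).mpr hinf)
    rw [List.drop_drop] at ht
    have : c + t ∈ pvOcc s := (pvOcc_mem s (c + t)).mpr ht
    rw [hsplit, List.append_nil] at this
    exact absurd (hpre _ this) (by omega)
  | j :: rest'' =>
    have hcj : c ≤ j := hrest j (by simp)
    have hj_occ : pvM <+: s.drop j := by
      have : j ∈ pvOcc s := by rw [hsplit]; simp
      exact (pvOcc_mem s j).mp this
    have hne : PySem.Chars.findFrom s pvM (c : Int) ≠ -1 := by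
      rw [Ne, PySem.Chars.findFrom_natCast_eq_neg_one_iff s pvM c hc, not_not]
    -- infix: occurrence at j ≥ c
      rw [← PySem.Chars.isIn_iff_infix, ← PySem.Chars.exists_prefix_drop_iff_isIn]
      exact ⟨j - c, by rw [List.drop_drop, show c + (j - c) = j from by omega]; exact hj_occ⟩
    obtain ⟨h1, h2, h3⟩ := PySem.Chars.findFrom_natCast_spec s pvM c hc hne
    set F := PySem.Chars.findFrom s pvM (c : Int) with hF
    have hF0 : 0 ≤ F := le_trans (by positivity) h1
    have hFc : c ≤ F.toNat := by omega
    have hFocc : F.toNat ∈ pvOcc s := (pvOcc_mem s F.toNat).mpr h2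
    rw [hsplit, List.mem_append] at hFocc
    have hFrest : F.toNat ∈ j :: rest'' := by
      rcases hFocc with h | h
      · exact absurd (hpre _ h) (by omega)
      · exact h
    have hjF : j ≤ F.toNat := by
      rcases List.mem_cons.mp hFrest with h | h
      · omega
      · have hpw := pvOcc_pairwise s
        rw [hsplit] at hpw
        have hj_lt := (List.pairwise_cons.mp (List.pairwise_append.mp hpw).2.1).1
        have := hj_lt _ h
        omega
    have : F.toNat = j := by
      by_contra hne2
      exact (h3 j hcj (by omega)) hj_occ
    show F = pvHead (j :: rest'')
    rw [show pvHead (j :: rest'') = (j : Int) from rfl, ← this, Int.toNat_of_nonneg hF0]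

lemma pvLoopLemma (response : String) :
    ∀ (rest : List Nat) (fuel : Nat) (acc : List String) (pre : List Nat),
    pvOcc response.toList = pre ++ rest → rest.length < fuel →
    pvAltLoop response fuel (pvHead rest) acc = acc ++ pvChunks response rest := by
  intro rest
  induction rest with
  | nil =>
    intro fuel acc pre hsplit hfuel
    match fuel with
    | f + 1 => simp [pvAltLoop, pvHead, pvChunks]
  | cons i rest' ih =>
    intro fuel acc pre hsplit hfuel
    match fuel, hfuel with
    | f + 1, hf =>
    have hi_occ : pvM <+: response.toList.drop i :=
      (pvOcc_mem _ i).mp (by rw [hsplit]; simp)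
    have hi_le : i + 20 ≤ response.toList.length := pvOcc_le _ i hi_occ
    have hpw := pvOcc_pairwise response.toList
    rw [hsplit] at hpw
    have hpre_lt : ∀ x ∈ pre, x < i :=
      fun x hx => (List.pairwise_append.mp hpw).2.2 x hx i (by simp)
    have hrest'_gt : ∀ x ∈ rest', i + 20 ≤ x := by
      intro x hx
      have hxi : i < x := (List.pairwise_cons.mp (List.pairwise_append.mp hpw).2.1).1 x hx
      have hx_occ : pvM <+: response.toList.drop x :=
        (pvOcc_mem _ x).mp (by rw [hsplit]; simp [hx])
      exact pvApart _ i x hi_occ hx_occ hxi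
    have hfind : PySem.Str.findFrom response "Possible step number" ((i : Int) + 20)
        = pvHead rest' := by
      rw [PySem.Str.findFrom_eq,
        show ((i : Int) + 20) = ((i + 20 : Nat) : Int) from by push_cast; ring,
        show "Possible step number".toList = pvM from rfl]
      exact pvFindFrom response.toList (i + 20) (pre ++ [i]) rest'
        (by rw [hsplit]; simp) 
        (by intro x hx; rcases List.mem_append.mp hx with h | h
            · exact lt_of_lt_of_le (hpre_lt x h) (by omega)
            · simp at h; omega)
        hrest'_gt hi_le
    show pvAltLoop response (f + 1) (pvHead (i :: rest')) acc = _
    rw [show pvHead (i :: rest') = (i : Int) from rfl]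
    rw [pvAltLoop]
    rw [if_neg (by simp)]
    simp only [hfind]
    match rest' with
    | [] =>
      rw [if_pos (by rfl)]
      rw [ih f _ (pre ++ [i]) (by rw [hsplit]; simp) (by simp at hf ⊢; omega)]
      simp [pvChunks, pvSliceEnd]
    | j :: rest'' =>
      rw [if_neg (by simp [pvHead])]
      rw [ih f _ (pre ++ [i]) (by rw [hsplit]; simp) (by simp at hf ⊢; omega)]
      simp [pvChunks, pvHead, List.append_assoc]

lemma pvAltEq (response : String) :
    extract_moves_configs_alt response = pvChunks response (pvOcc response.toList) := by
  unfold extract_moves_configs_alt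
  have hfind : PySem.Str.find response "Possible step number" = pvHead (pvOcc response.toList) := by
    rw [PySem.Str.find_eq, ← PySem.Chars.findFrom_zero,
      show (0 : Int) = ((0 : Nat) : Int) from rfl,
      show "Possible step number".toList = pvM from rfl]
    exact pvFindFrom response.toList 0 [] _ (by simp) (by simp) (by omega) (by omega)
  rw [hfind]
  rw [pvLoopLemma response (pvOcc response.toList) _ [] [] (by simp)
    (by have := List.length_filter_le (fun k => pvM.isPrefixOf (List.drop k response.toList))
          (List.range (response.toList.length - 19))
        simp only [pvOcc]; 
        have h2 := this; rw [List.length_range] at h2; omega)]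
  simp

lemma pvIdxEq (response : String) :
    (PySem.List.pyRange 0 (PySem.Str.len response - 19)).foldl
      (fun acc k =>
        if PySem.Str.isIn "Possible step number"
            (PySem.Str.slice response (some k) (some (k + 20))) then
          acc ++ [k]
        else acc) []
      = (pvOcc response.toList).map (fun k : Nat => (k : Int)) := by
  have hlen : PySem.Str.len response = (response.toList.length : Int) := by
    simp [PySem.Str.len_eq]
  set n := response.toList.length with hn
  have hrange : PySem.List.pyRange 0 (PySem.Str.len response - 19)
      = (List.range (n - 19)).map (fun k : Nat => (k : Int)) := by
    by_cases h19 : 19 ≤ n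
    · rw [hlen, show ((n : Int) - 19) = ((n - 19 : Nat) : Int) from by push_cast [h19]; ring]
      exact PySem.List.pyRange_zero_natCast (n - 19)
    · rw [show n - 19 = 0 from by omega]
      rw [List.range_zero, List.map_nil]
      rw [List.eq_nil_iff_forall_not_mem]
      intro x hx
      rw [PySem.List.mem_pyRange_one] at hx
      rw [hlen] at hx
      omega
  rw [hrange]
  rw [PySem.List.foldl_append_if (fun k => PySem.Str.isIn "Possible step number"
        (PySem.Str.slice response (some k) (some (k + 20)))) (fun k => k)]
  rw [List.nil_append, List.filter_map]
  unfold pvOcc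
  rw [← hn]
  rw [List.map_id']
  apply congrArg (List.map (fun k : Nat => (k : Int)))
  apply List.filter_congr
  intro k hk
  rw [List.mem_range] at hk
  simp only [Function.comp]
  show PySem.Str.isIn "Possible step number"
      (PySem.Str.slice response (some (k : Int)) (some ((k : Int) + 20)))
    = pvM.isPrefixOf (List.drop k response.toList)
  rw [PySem.Str.isIn_eq, PySem.Str.toList_slice, PySem.Chars.slice_eq_listSlice]
  rw [show ((k : Int) + 20) = ((k + 20 : Nat) : Int) from by push_cast; ring]
  rw [PySem.List.slice_natCast]
  rw [show (k + 20) - k = 20 from by omega]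
  exact pvWindowEq response.toList k (by omega)

lemma pvEnumMap (response : String) (os : List Nat) :
    ∀ (rest : List Nat) (k : Nat), os.drop k = rest →
    (PySem.List.enumerate (rest.map (fun x : Nat => (x : Int))) (k : Int)).map
      (fun p : Int × Int =>
        if p.1 < (((os.map (fun x : Nat => (x : Int))).length : Nat) : Int) - 1 then
          pvLastColon (PySem.Str.slice response (some p.2)
            (some (PySem.List.pyGetD (os.map (fun x : Nat => (x : Int))) (p.1 + 1) 0)))
        else
          pvLastColon (PySem.Str.slice response (some p.2)
            (some (PySem.Str.len response))))
      = pvChunks response rest := by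
  intro rest
  induction rest with
  | nil => intro k hk; simp [pvChunks]
  | cons i rest' ih =>
    intro k hk
    have hlen_eq : os.length - k = rest'.length + 1 := by
      have := congrArg List.length hk
      rw [List.length_drop] at this
      simpa using this
    have hklen : k < os.length := by omega
    have hdrop1 : os.drop (k + 1) = rest' := by
      have := congrArg (List.drop 1) hk
      rw [List.drop_drop] at this
      simpa using this
    rw [List.map_cons,
      show PySem.List.enumerate ((i : Int) :: rest'.map (fun x : Nat => (x : Int))) (k : Int)
        = ((k : Int), (i : Int)) :: PySem.List.enumerate (rest'.map (fun x : Nat => (x : Int)))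
            ((k : Int) + 1) from rfl,
      List.map_cons]
    rw [show ((k : Int) + 1) = ((k + 1 : Nat) : Int) from by push_cast; ring]
    rw [ih (k + 1) hdrop1]
    rw [show pvChunks response (i :: rest')
        = pvLastColon (PySem.Str.slice response (some (i : Int))
            (some ((rest'.headD response.toList.length : Nat) : Int))) :: pvChunks response rest'
      from rfl]
    apply List.cons_eq_cons.mpr ⟨?_, rfl⟩
    rw [List.length_map]
    match rest' with
    | [] =>
      rw [if_neg (by simp at hlen_eq; omega)]
      rw [show PySem.Str.len response = ((response.toList.length : Nat) : Int) from by
        simp [PySem.Str.len_eq]]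
      rfl
    | j :: rest'' =>
      have hk2 : k + 1 < os.length := by simp at hlen_eq; omega
      rw [if_pos (by push_cast; omega)]
      rw [PySem.List.pyGetD_natCast]
      rw [List.getD_eq_getElem _ _ (by rw [List.length_map]; exact hk2)]
      rw [List.getElem_map]
      have hjth : os[k + 1]'hk2 = j := by
        have h0 : (os.drop (k + 1))[0]'(by rw [hdrop1]; simp) = j := by
          simp [hdrop1]
        rw [List.getElem_drop] at h0
        simpa using h0
      rw [hjth]
      rfl

lemma pvAEq (response : String) :
    extract_moves_configs response = pvChunks response (pvOcc response.toList) := by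
  unfold extract_moves_configs
  simp only [pvIdxEq]
  rw [show (fun (all : List String) (p : Int × Int) =>
        if p.1 < (((pvOcc response.toList).map (fun k : Nat => (k : Int))).length : Int) - 1 then
          all ++ [pvLastColon (PySem.Str.slice response (some p.2)
            (some (PySem.List.pyGetD ((pvOcc response.toList).map (fun k : Nat => (k : Int)))
              (p.1 + 1) 0)))]
        else
          all ++ [pvLastColon (PySem.Str.slice response (some p.2)
            (some (PySem.Str.len response)))])
      = (fun (all : List String) (p : Int × Int) =>
          all ++ [if p.1 < (((pvOcc response.toList).map (fun k : Nat => (k : Int))).length : Int) - 1 then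
            pvLastColon (PySem.Str.slice response (some p.2)
              (some (PySem.List.pyGetD ((pvOcc response.toList).map (fun k : Nat => (k : Int)))
                (p.1 + 1) 0)))
          else
            pvLastColon (PySem.Str.slice response (some p.2)
              (some (PySem.Str.len response)))])
    from by funext all p; split_ifs <;> rfl]
  rw [PySem.List.foldl_append_singleton_eq_map, List.nil_append]
  rw [show (0 : Int) = ((0 : Nat) : Int) from rfl]
  exact pvEnumMap response (pvOcc response.toList) (pvOcc response.toList) 0 rfl

-- ===== VERDICT (by name: the statement is the Claim_ definition above) =====
theorem extract_moves_configs_spec : Claim_equal_extract_moves_configs := by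
  intro response _
  unfold Spec_extract_moves_configs
  rw [pvAEq, pvAltEq]
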